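-- pv_equiv track=rewrite | github.com/rbaron/advent-of-code-2024 | day23/main.py | find_largest_group
-- ===== SOURCE A (Python) =====
-- def find_largest_group(children_by_parent):
--     largest = set()
--     for n in children_by_parent:
--         clique = set([n])
--         # Try to grow.
--         for nn in children_by_parent:
--             if all(nn in children_by_parent[c] for c in clique):
--                 clique.add(nn)
--
--         if len(clique) > len(largest):
--             largest = clique
--     return largest
-- ===== SOURCE B (Python) =====
-- def find_largest_group(children_by_parent):
--     nodes = list(children_by_parent)
--
--     def grow(start):
--         # Incrementally maintained intersection of the clique members' child
--         # sets: a candidate can join iff it is in `common` (one membership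
--         # test, instead of rescanning children_by_parent[c] for every member c).
--         clique = {start}
--         common = set(children_by_parent[start])
--         for nn in nodes:
--             if nn in common:
--                 clique.add(nn)
--                 common = common & children_by_parent[nn]
--         return clique
--
--     return max(map(grow, nodes), key=len, default=set())
-- ===== Notes on version B (the rewrite author's own statement) =====
-- stated objective: faster
-- what changed: B grows each start node's clique with an incrementally maintained intersection of the members' child sets (one membership test per candidate instead of A's all(...) rescan over every clique member), and selects the answer by mapping a grow helper over the nodes and taking max(..., key=len) instead of A's inline fold with a running largest.
import Mathlib
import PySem

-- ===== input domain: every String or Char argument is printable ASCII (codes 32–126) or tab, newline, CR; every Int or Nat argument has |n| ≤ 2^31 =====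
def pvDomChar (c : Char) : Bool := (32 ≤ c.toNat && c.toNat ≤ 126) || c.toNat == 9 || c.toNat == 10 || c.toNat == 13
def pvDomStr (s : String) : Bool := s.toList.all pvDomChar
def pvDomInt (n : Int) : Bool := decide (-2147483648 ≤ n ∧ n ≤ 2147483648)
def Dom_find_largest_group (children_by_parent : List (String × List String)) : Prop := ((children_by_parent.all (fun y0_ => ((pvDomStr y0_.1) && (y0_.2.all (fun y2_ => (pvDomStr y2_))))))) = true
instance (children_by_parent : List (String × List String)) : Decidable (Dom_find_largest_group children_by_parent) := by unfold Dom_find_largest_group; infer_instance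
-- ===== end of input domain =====

-- B grows each clique with an incrementally maintained intersection of the clique
-- members' child sets (one membership test per candidate instead of A's all(...)
-- rescan), and selects the answer by map + max(key=len) instead of A's inline fold.
-- The dict argument is an association list (iteration = first occurrences of the
-- keys in order, lookup = first match).

-- ===== PORT A =====
-- children_by_parent[c]: first-match lookup; c is always a key, so Python never raises KeyError
def fl_lookup (children_by_parent : List (String × List String)) (c : String) : List String :=
  (PySem.Dict.mk children_by_parent).getD c []

def find_largest_group (children_by_parent : List (String × List String)) : List String :=
  let keys := PySem.List.dedup (children_by_parent.map Prod.fst)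
  keys.foldl (fun largest n =>
    let clique := keys.foldl (fun clique nn =>
      if clique.all (fun c => (fl_lookup children_by_parent c).contains nn)
      then PySem.Set.add clique nn else clique) (PySem.Set.ofList [n])
    if clique.length > largest.length then clique else largest) []

-- ===== PORT B =====
-- children_by_parent[c] on B's side (same first-match dict lookup)
def flg_kids (children_by_parent : List (String × List String)) (c : String) : List String :=
  (PySem.Dict.mk children_by_parent).getD c []

-- the `for nn in nodes` loop of Source B's grow, as structural recursion over nodes
def flg_growAux (children_by_parent : List (String × List String)) :
    List String → List String → List String → List String
  | [], clique, _ => clique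
  | nn :: rest, clique, common =>
    if common.contains nn then
      flg_growAux children_by_parent rest (PySem.Set.add clique nn)
        (PySem.Set.inter common (flg_kids children_by_parent nn))
    else
      flg_growAux children_by_parent rest clique common

def flg_grow (children_by_parent : List (String × List String)) (nodes : List String)
    (start : String) : List String :=
  flg_growAux children_by_parent nodes (PySem.Set.ofList [start])
    (PySem.Set.ofList (flg_kids children_by_parent start))

def find_largest_group_alt (children_by_parent : List (String × List String)) : List String :=
  let nodes := PySem.List.dedup (children_by_parent.map Prod.fst)
  (PySem.List.max? (nodes.map (flg_grow children_by_parent nodes))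
    (fun c => c.length)).getD []

-- ===== PRECONDITION & SPEC =====
def Spec_find_largest_group (children_by_parent : List (String × List String)) (out : List String) : Prop := out = find_largest_group_alt children_by_parent
instance (children_by_parent : List (String × List String)) (out : List String) : Decidable (Spec_find_largest_group children_by_parent out) := by unfold Spec_find_largest_group; infer_instance

-- ===== CLAIM =====
def Claim_equal_find_largest_group : Prop := ∀ (children_by_parent : List (String × List String)), Dom_find_largest_group children_by_parent → Spec_find_largest_group children_by_parent (find_largest_group children_by_parent)

-- ===== LEMMAS AND PROOFS =====

-- Inner-loop invariant: B's `common` holds exactly the strings every current clique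
-- member lists as a child, so A's all(...) test and B's membership test decide alike
-- and the two inner loops build the identical clique list.
theorem flg_inner_eq (cbp : List (String × List String)) (ks : List String)
    (clique common : List String)
    (hinv : ∀ x : String, x ∈ common ↔ ∀ c ∈ clique, x ∈ fl_lookup cbp c) :
    ks.foldl (fun clique nn =>
      if clique.all (fun c => (fl_lookup cbp c).contains nn)
      then PySem.Set.add clique nn else clique) clique
    = flg_growAux cbp ks clique common := by
  induction ks generalizing clique common with
  | nil => rfl
  | cons nn ks ih =>
    simp only [List.foldl_cons, flg_growAux]
    have hcond : (clique.all (fun c => (fl_lookup cbp c).contains nn)) = common.contains nn := by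
      rw [Bool.eq_iff_iff]
      simp [List.all_eq_true, hinv nn]
    rw [hcond]
    by_cases h : common.contains nn = true
    · simp only [h, if_true]
      refine ih _ _ ?_
      intro x
      rw [PySem.Set.mem_inter _ _ _]
      constructor
      · rintro ⟨hx, hxl⟩ c hc
        rcases (PySem.Set.mem_add _ _ _).1 hc with hc | hc
        · exact ((hinv x).1 hx) c hc
        · show x ∈ fl_lookup cbp c
          unfold fl_lookup
          unfold flg_kids at hxl
          simpa [hc] using hxl
      · intro hall
        refine ⟨(hinv x).2 (fun c hc => hall c ((PySem.Set.mem_add _ _ _).2 (Or.inl hc))), ?_⟩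
        show x ∈ flg_kids cbp nn
        exact hall nn ((PySem.Set.mem_add _ _ _).2 (Or.inr rfl))
    · simp only [h]
      exact ih _ _ hinv

-- Python's max(..., key=len) step function, named so the folds can be compared
def flg_selStep (acc : Option (List String)) (x : List String) : Option (List String) :=
  match acc with
  | none => some x
  | some m => if m.length < x.length then some x else some m

theorem flg_max?_eq (l : List (List String)) :
    PySem.List.max? l (fun c : List String => c.length) = l.foldl flg_selStep none := by
  unfold PySem.List.max?
  congr 1
  funext acc x
  cases acc <;> rfl

-- Outer selection: A's running-largest fold equals Python max(key=len) (first
-- maximal element) over the list of cliques, with [] for an empty node list.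
theorem flg_outer_eq (f : String → List String) (ks : List String) :
    ks.foldl (fun largest n => if (f n).length > largest.length then f n else largest) []
    = (PySem.List.max? (ks.map f) (fun c => c.length)).getD [] := by
  rw [flg_max?_eq]
  have step : ∀ (t : List String) (m : List String),
      t.foldl (fun largest n => if (f n).length > largest.length then f n else largest) m
      = ((t.map f).foldl flg_selStep (some m)).getD [] := by
    intro t
    induction t with
    | nil => intro m; rfl
    | cons n t ih =>
      intro m
      simp only [List.map_cons, List.foldl_cons]
      show (List.foldl _ (if m.length < (f n).length then f n else m) t) = _
      rw [show flg_selStep (some m) (f n)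
            = some (if m.length < (f n).length then f n else m) from by
          simp only [flg_selStep]; split_ifs <;> rfl]
      by_cases h : m.length < (f n).length
      · simp only [h, if_true]; exact ih (f n)
      · simp only [h, if_false]; exact ih m
  cases ks with
  | nil => rfl
  | cons n t =>
    simp only [List.foldl_cons, List.map_cons]
    have h0 : (if (f n).length > List.length ([] : List String) then f n else []) = f n := by
      by_cases h : (f n).length > 0
      · simp [h]
      · have : f n = [] := List.eq_nil_of_length_eq_zero (by omega)
        simp [this]
    rw [h0, step t (f n)]
    rfl

-- ===== VERDICT =====
theorem find_largest_group_spec : Claim_equal_find_largest_group := by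
  intro cbp _
  unfold Spec_find_largest_group find_largest_group find_largest_group_alt
  have hinner : ∀ n : String,
      (PySem.List.dedup (cbp.map Prod.fst)).foldl (fun clique nn =>
        if clique.all (fun c => (fl_lookup cbp c).contains nn)
        then PySem.Set.add clique nn else clique) (PySem.Set.ofList [n])
      = flg_grow cbp (PySem.List.dedup (cbp.map Prod.fst)) n := by
    intro n
    unfold flg_grow
    apply flg_inner_eq
    intro x
    constructor
    · intro hx c hc
      have : c = n := by simpa [PySem.Set.mem_ofList] using hc
      subst this
      unfold flg_kids at hx
      simpa [PySem.Set.mem_ofList, fl_lookup] using hx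
    · intro hall
      have := hall n (by simp [PySem.Set.mem_ofList])
      unfold fl_lookup at this
      simpa [PySem.Set.mem_ofList, flg_kids] using this
  simp only [hinner]
  exact flg_outer_eq _ _
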